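-- pv_equiv track=rewrite | github.com/JardinConnect/GardenBack | services/network/providers/linux_nmcli.py | _parse_dev_blocks
-- ===== SOURCE A (Python) =====
-- from typing import List
--
-- def _parse_dev_blocks(stdout: str) -> List[dict]:
--     blocks: List[dict] = []
--     current: dict = {}
--     for line in stdout.strip().split("\n"):
--         if ":" not in line:
--             continue
--         key, _, value = line.partition(":")
--         key = key.strip()
--         value = value.strip()
--         if key == "GENERAL.DEVICE":
--             if current:
--                 blocks.append(current)
--             current = {"interface": value}
--         elif key.startswith("IP4.ADDRESS") and "ip_address" not in current:
--             current["ip_address"] = value.split("/")[0] if value else None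
--         elif key == "IP4.GATEWAY":
--             current["gateway"] = value or None
--         elif key == "GENERAL.TYPE":
--             current["type"] = value
--         elif key == "GENERAL.HWADDRESS":
--             current["mac_address"] = value or None
--     if current:
--         blocks.append(current)
--     return blocks
-- ===== SOURCE B (Python) =====
-- from typing import List
--
--
-- def _field(key):
--     if key == "GENERAL.DEVICE":
--         return "interface"
--     if key.startswith("IP4.ADDRESS"):
--         return "ip_address"
--     return {"IP4.GATEWAY": "gateway", "GENERAL.TYPE": "type",
--             "GENERAL.HWADDRESS": "mac_address"}.get(key)
--
--
-- def _build_block(seg):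
--     # Within one segment GENERAL.DEVICE can only be the first line, so no reset is needed.
--     chosen = {}
--     for key, value in seg:
--         f = _field(key)
--         if f is None:
--             continue
--         if f == "ip_address":
--             if f in chosen:
--                 continue
--             chosen[f] = value.split("/")[0] if value else None
--         elif f == "interface" or f == "type":
--             chosen[f] = value
--         else:
--             chosen[f] = value or None
--     return chosen
--
--
-- def _parse_dev_blocks(stdout: str) -> List[dict]:
--     kvs = []
--     for line in stdout.strip().split("\n"):
--         if ":" in line:
--             key, _, value = line.partition(":")
--             kvs.append((key.strip(), value.strip()))
--     segments = []
--     seg = []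
--     for kv in kvs:
--         if kv[0] == "GENERAL.DEVICE":
--             segments.append(seg)
--             seg = [kv]
--         else:
--             seg.append(kv)
--     segments.append(seg)
--     result = []
--     for s in segments:
--         d = _build_block(s)
--         if d:
--             result.append(d)
--     return result
-- ===== Notes on version B (the rewrite author's own statement) =====
-- stated objective: alternative
-- what changed: Replaces A's single accumulator-with-flush loop by a three-pass pipeline: parse lines to key/value pairs, partition them into per-device segments at GENERAL.DEVICE, then build each block independently via a key-to-field mapping table (no dict reset needed inside a segment), keeping only non-empty blocks.
import Mathlib
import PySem

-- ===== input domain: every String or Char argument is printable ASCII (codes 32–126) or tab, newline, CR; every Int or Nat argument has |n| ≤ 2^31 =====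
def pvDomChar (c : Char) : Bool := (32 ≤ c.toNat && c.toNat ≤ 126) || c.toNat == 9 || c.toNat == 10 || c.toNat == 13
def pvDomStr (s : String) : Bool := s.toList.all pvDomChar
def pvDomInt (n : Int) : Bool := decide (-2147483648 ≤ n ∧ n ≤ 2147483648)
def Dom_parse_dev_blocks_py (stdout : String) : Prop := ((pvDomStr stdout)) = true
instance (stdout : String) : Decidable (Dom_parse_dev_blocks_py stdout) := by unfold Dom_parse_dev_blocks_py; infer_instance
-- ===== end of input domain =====

-- B replaces A's single accumulator-with-flush loop by a three-pass pipeline (parse key/value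
-- pairs, partition into per-device segments, build each block via a key→field mapping);
-- objective: alternative decomposition, same cost.

-- ===== PORT A =====
-- the non-GENERAL.DEVICE part of A's elif chain
def pvApplyKV (current : PySem.Dict String (Option String)) (key value : String) :
    PySem.Dict String (Option String) :=
  if PySem.Str.startswith key "IP4.ADDRESS" && !(current.contains "ip_address") then
    current.insert "ip_address"
      (if value = "" then none else some (((PySem.Str.split? value "/").getD []).headD ""))
  else if key = "IP4.GATEWAY" then
    current.insert "gateway" (if value = "" then none else some value)
  else if key = "GENERAL.TYPE" then
    current.insert "type" (some value)
  else if key = "GENERAL.HWADDRESS" then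
    current.insert "mac_address" (if value = "" then none else some value)
  else current

-- A's loop body once key/value are parsed (state = (blocks, current))
def pvAstepKV (st : List (PySem.Dict String (Option String)) × PySem.Dict String (Option String))
    (key value : String) :
    List (PySem.Dict String (Option String)) × PySem.Dict String (Option String) :=
  if key = "GENERAL.DEVICE" then
    ((if st.2.items = [] then st.1 else st.1 ++ [st.2]),
      PySem.Dict.empty.insert "interface" (some value))
  else (st.1, pvApplyKV st.2 key value)

-- A's loop body on a raw line: skip lines without ':', partition and strip, then the chain
def pvAstep (st : List (PySem.Dict String (Option String)) × PySem.Dict String (Option String))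
    (line : String) :
    List (PySem.Dict String (Option String)) × PySem.Dict String (Option String) :=
  if PySem.Str.isIn ":" line then
    match PySem.Str.splitMax? line ":" 1 with
    | some (k :: v :: _) => pvAstepKV st (PySem.Str.strip k) (PySem.Str.strip v)
    | _ => st
  else st

def parse_dev_blocks_py (stdout : String) : List (List (String × Option String)) :=
  let st := (((PySem.Str.split? (PySem.Str.strip stdout) "\n").getD []).foldl
    pvAstep ([], PySem.Dict.empty))
  (if st.2.items = [] then st.1 else st.1 ++ [st.2]).map (fun d => d.items)

-- ===== PORT B =====
-- _field: map an nmcli key to the output field name (or none)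
def pvField? (key : String) : Option String :=
  if key = "GENERAL.DEVICE" then some "interface"
  else if PySem.Str.startswith key "IP4.ADDRESS" then some "ip_address"
  else (PySem.Dict.ofList
    [("IP4.GATEWAY", "gateway"), ("GENERAL.TYPE", "type"),
     ("GENERAL.HWADDRESS", "mac_address")]).get? key

-- _build_block's loop body
def pvBStep (chosen : PySem.Dict String (Option String)) (kv : String × String) :
    PySem.Dict String (Option String) :=
  match pvField? kv.1 with
  | none => chosen
  | some f =>
    if f = "ip_address" then
      if chosen.contains f then chosen
      else chosen.insert f
        (if kv.2 = "" then none else some (((PySem.Str.split? kv.2 "/").getD []).headD ""))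
    else if f = "interface" ∨ f = "type" then chosen.insert f (some kv.2)
    else chosen.insert f (if kv.2 = "" then none else some kv.2)

-- _build_block
def pvBuild (seg : List (String × String)) : PySem.Dict String (Option String) :=
  seg.foldl pvBStep PySem.Dict.empty

-- first pass: key/value pairs of the lines containing ':'
def pvBParseStep (kvs : List (String × String)) (line : String) : List (String × String) :=
  if PySem.Str.isIn ":" line then
    match PySem.Str.splitMax? line ":" 1 with
    | some (k :: v :: _) => kvs ++ [(PySem.Str.strip k, PySem.Str.strip v)]
    | _ => kvs
  else kvs

def pvParseKVs (stdout : String) : List (String × String) :=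
  ((PySem.Str.split? (PySem.Str.strip stdout) "\n").getD []).foldl pvBParseStep []

-- second pass: start a new segment at each GENERAL.DEVICE pair (state = (segments, current))
def pvSegStep (st : List (List (String × String)) × List (String × String))
    (kv : String × String) : List (List (String × String)) × List (String × String) :=
  if kv.1 = "GENERAL.DEVICE" then (st.1 ++ [st.2], [kv]) else (st.1, st.2 ++ [kv])

def pvSegments (kvs : List (String × String)) : List (List (String × String)) :=
  (kvs.foldl pvSegStep ([], [])).1 ++ [(kvs.foldl pvSegStep ([], [])).2]

-- third pass: build each segment, keep the non-empty blocks
def pvOutStep (res : List (List (String × Option String))) (seg : List (String × String)) :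
    List (List (String × Option String)) :=
  if (pvBuild seg).items = [] then res else res ++ [(pvBuild seg).items]

def parse_dev_blocks_py_alt (stdout : String) : List (List (String × Option String)) :=
  (pvSegments (pvParseKVs stdout)).foldl pvOutStep []

-- ===== PRECONDITION & SPEC =====
def Spec_parse_dev_blocks_py (stdout : String) (out : List (List (String × Option String))) : Prop := out = parse_dev_blocks_py_alt stdout
instance (stdout : String) (out : List (List (String × Option String))) : Decidable (Spec_parse_dev_blocks_py stdout out) := by unfold Spec_parse_dev_blocks_py; infer_instance

-- ===== CLAIM (what is proved, stated in full; the proofs are below) =====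
def Claim_equal_parse_dev_blocks_py : Prop := ∀ (stdout : String), Dom_parse_dev_blocks_py stdout → Spec_parse_dev_blocks_py stdout (parse_dev_blocks_py stdout)

-- ===== LEMMAS AND PROOFS =====

-- A's run, abstracted: the blocks emitted from the remaining kv pairs, starting with dict `cur`
def pvEmit : PySem.Dict String (Option String) → List (String × String) →
    List (PySem.Dict String (Option String))
  | cur, [] => if cur.items = [] then [] else [cur]
  | cur, kv :: rest =>
    if kv.1 = "GENERAL.DEVICE" then
      (if cur.items = [] then [] else [cur]) ++
        pvEmit (PySem.Dict.empty.insert "interface" (some kv.2)) rest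
    else pvEmit (pvApplyKV cur kv.1 kv.2) rest

theorem pvBParseStep_eq (acc : List (String × String)) (l : String) :
    pvBParseStep acc l = acc ++ pvBParseStep [] l := by
  unfold pvBParseStep
  split
  · split <;> simp
  · simp

theorem pvParse_acc (lines : List String) :
    ∀ acc, lines.foldl pvBParseStep acc = acc ++ lines.foldl pvBParseStep [] := by
  induction lines with
  | nil => simp
  | cons l ls ih =>
    intro acc
    simp only [List.foldl_cons]
    rw [ih (pvBParseStep acc l), ih (pvBParseStep [] l), pvBParseStep_eq acc l,
      List.append_assoc]

theorem pvOutStep_eq (acc : List (List (String × Option String))) (s : List (String × String)) :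
    pvOutStep acc s = acc ++ pvOutStep [] s := by
  unfold pvOutStep
  split <;> simp

-- A's line-level loop equals the kv-level loop over B's parsed pairs
theorem pvA_lines_eq_kvs (lines : List String) :
    ∀ st, lines.foldl pvAstep st =
      (lines.foldl pvBParseStep []).foldl (fun s kv => pvAstepKV s kv.1 kv.2) st := by
  induction lines with
  | nil => intro st; rfl
  | cons l ls ih =>
    intro st
    simp only [List.foldl_cons]
    rw [ih (pvAstep st l), pvParse_acc ls (pvBParseStep [] l), List.foldl_append]
    congr 1
    unfold pvAstep pvBParseStep
    split
    · split <;> rfl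
    · rfl

-- A's kv-level loop, flushed, produces pvEmit
theorem pvA_kvs_eq_emit (kvs : List (String × String)) :
    ∀ (blocks : List (PySem.Dict String (Option String))) cur,
      (if (kvs.foldl (fun s kv => pvAstepKV s kv.1 kv.2) (blocks, cur)).2.items = []
        then (kvs.foldl (fun s kv => pvAstepKV s kv.1 kv.2) (blocks, cur)).1
        else (kvs.foldl (fun s kv => pvAstepKV s kv.1 kv.2) (blocks, cur)).1 ++
          [(kvs.foldl (fun s kv => pvAstepKV s kv.1 kv.2) (blocks, cur)).2]) =
      blocks ++ pvEmit cur kvs := by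
  induction kvs with
  | nil =>
    intro blocks cur
    simp only [List.foldl_nil, pvEmit]
    split <;> simp
  | cons kv rest ih =>
    intro blocks cur
    obtain ⟨k, v⟩ := kv
    simp only [List.foldl_cons, pvEmit]
    by_cases h : k = "GENERAL.DEVICE"
    · rw [show pvAstepKV (blocks, cur) (k, v).1 (k, v).2 =
          ((if cur.items = [] then blocks else blocks ++ [cur]),
            PySem.Dict.empty.insert "interface" (some v)) from by
        simp [pvAstepKV, h]]
      rw [ih]
      simp only [h, reduceIte]
      split <;> simp
    · rw [show pvAstepKV (blocks, cur) (k, v).1 (k, v).2 =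
          (blocks, pvApplyKV cur k v) from by simp [pvAstepKV, h]]
      rw [ih]
      simp [h]

-- A's per-kv update equals B's field-mapped update (away from GENERAL.DEVICE)
theorem pvBStep_eq_apply (d : PySem.Dict String (Option String)) (k v : String)
    (h : k ≠ "GENERAL.DEVICE") : pvBStep d (k, v) = pvApplyKV d k v := by
  by_cases hs : PySem.Str.startswith k "IP4.ADDRESS" = true
  · have h1 : k ≠ "IP4.GATEWAY" := by rintro rfl; exact absurd hs (by decide)
    have h2 : k ≠ "GENERAL.TYPE" := by rintro rfl; exact absurd hs (by decide)
    have h3 : k ≠ "GENERAL.HWADDRESS" := by rintro rfl; exact absurd hs (by decide)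
    have hf : pvField? k = some "ip_address" := by
      unfold pvField?; rw [if_neg h, if_pos hs]
    by_cases hc : d.contains "ip_address" = true
    · simp only [pvBStep, hf, pvApplyKV, hc, if_true, if_neg h1, if_neg h2, if_neg h3]
      simp
    · have hc' : d.contains "ip_address" = false := by simpa using hc
      simp only [pvBStep, hf, pvApplyKV, hc', if_true]
      have hsl : PySem.Chars.startswith k.toList
          ['I', 'P', '4', '.', 'A', 'D', 'D', 'R', 'E', 'S', 'S'] = true := hs
      simp [hsl]
  · have hs0 : PySem.Str.startswith k "IP4.ADDRESS" = false := by simpa using hs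
    have hb : (PySem.Str.startswith k "IP4.ADDRESS" && !(d.contains "ip_address")) = false := by
      rw [hs0]; rfl
    by_cases h1 : k = "IP4.GATEWAY"
    · subst h1
      have hf : pvField? "IP4.GATEWAY" = some "gateway" := by decide
      simp only [pvBStep, hf, pvApplyKV, hb, Bool.false_eq_true, if_false]
      simp
    · by_cases h2 : k = "GENERAL.TYPE"
      · subst h2
        have hf : pvField? "GENERAL.TYPE" = some "type" := by decide
        simp only [pvBStep, hf, pvApplyKV, hb, Bool.false_eq_true, if_false, if_neg h1]
        simp
      · by_cases h3 : k = "GENERAL.HWADDRESS"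
        · subst h3
          have hf : pvField? "GENERAL.HWADDRESS" = some "mac_address" := by decide
          simp only [pvBStep, hf, pvApplyKV, hb, Bool.false_eq_true, if_false,
            if_neg h1, if_neg h2]
          simp
        · have hD : PySem.Dict.ofList
              [(("IP4.GATEWAY" : String), ("gateway" : String)), ("GENERAL.TYPE", "type"),
               ("GENERAL.HWADDRESS", "mac_address")] =
              PySem.Dict.mk [("IP4.GATEWAY", "gateway"), ("GENERAL.TYPE", "type"),
                ("GENERAL.HWADDRESS", "mac_address")] := by decide
          have hf : pvField? k = none := by
            unfold pvField?
            rw [if_neg h, if_neg (by rw [hs0]; simp), hD]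
            simp [Ne.symm h1, Ne.symm h2, Ne.symm h3, PySem.Dict.get?]
          simp only [pvBStep, hf, pvApplyKV, hb, Bool.false_eq_true, if_false,
            if_neg h1, if_neg h2, if_neg h3]

-- B's segment machinery produces pvEmit
theorem pvB_segs_eq_emit (kvs : List (String × String)) :
    ∀ (segs : List (List (String × String))) seg,
      (((kvs.foldl pvSegStep (segs, seg)).1 ++
        [(kvs.foldl pvSegStep (segs, seg)).2]).foldl pvOutStep []) =
      segs.foldl pvOutStep [] ++ (pvEmit (pvBuild seg) kvs).map (fun d => d.items) := by
  induction kvs with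
  | nil =>
    intro segs seg
    simp only [List.foldl_nil, List.foldl_append, pvEmit]
    rw [List.foldl_cons, List.foldl_nil, pvOutStep_eq]
    congr 1
    unfold pvOutStep
    split <;> simp
  | cons kv rest ih =>
    intro segs seg
    obtain ⟨k, v⟩ := kv
    simp only [List.foldl_cons, pvEmit]
    by_cases h : k = "GENERAL.DEVICE"
    · rw [show pvSegStep (segs, seg) (k, v) = (segs ++ [seg], [(k, v)]) from by
        simp [pvSegStep, h]]
      rw [ih (segs ++ [seg]) [(k, v)]]
      have hb : pvBuild [(k, v)] = PySem.Dict.empty.insert "interface" (some v) := by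
        simp [pvBuild, pvBStep, pvField?, h]
      rw [hb, List.foldl_append, List.foldl_cons, List.foldl_nil, pvOutStep_eq]
      simp only [h, reduceIte, List.map_append, List.append_assoc]
      congr 2
      unfold pvOutStep
      split <;> simp
    · rw [show pvSegStep (segs, seg) (k, v) = (segs, seg ++ [(k, v)]) from by
        simp [pvSegStep, h]]
      rw [ih segs (seg ++ [(k, v)])]
      have hb : pvBuild (seg ++ [(k, v)]) = pvApplyKV (pvBuild seg) k v := by
        rw [pvBuild, List.foldl_append]
        exact pvBStep_eq_apply _ k v h
      rw [hb]
      simp [h]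

-- ===== VERDICT (by name: the statement is the Claim_ definition above) =====
theorem parse_dev_blocks_py_spec : Claim_equal_parse_dev_blocks_py := by
  intro stdout _
  unfold Spec_parse_dev_blocks_py parse_dev_blocks_py parse_dev_blocks_py_alt pvSegments
    pvParseKVs
  simp only
  rw [pvA_lines_eq_kvs, pvA_kvs_eq_emit, pvB_segs_eq_emit]
  simp [show pvBuild [] = PySem.Dict.empty from rfl]
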